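-- pv_equiv track=rewrite | github.com/WillSchick/LeetCode-Solutions | DynamicProgramming/climbStairs.py | climbStairsDynamic
-- ===== SOURCE A (Python) =====
-- def climbStairsDynamic(n, memo):
--     if memo[n] is not None: # If the index exists, return it instead of computing it.
--         return memo[n] # This allows us to save on repetitious computation time (Better than our recursive solution!!!!)
--     else: # If we need to compute it
--         if n == 0 or n == 1: # If we're on the floor or bottom step...
--             memo[n] = 1
--             return 1
--         else: # If we're step 2 or higher...
--             memo[n] = climbStairsDynamic(n-1, memo) + climbStairsDynamic(n-2, memo)
--             return memo[n]
-- ===== SOURCE B (Python) =====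
-- def climbStairsDynamic(n, memo):
--     # Iterative bottom-up pass (no recursion, no memo mutation); return value only.
--     if memo[n] is not None:
--         return memo[n]
--     prev2 = prev1 = None
--     for k in range(n + 1):
--         if memo[k] is not None:
--             cur = memo[k]
--         elif k <= 1:
--             cur = 1
--         else:
--             cur = prev1 + prev2
--         prev2, prev1 = prev1, cur
--     return prev1
-- ===== Notes on version B (the rewrite author's own statement) =====
-- stated objective: alternative
-- what changed: Replaces A's top-down memoized recursion (which also writes computed values into memo) with a single iterative bottom-up pass over 0..n that honours pre-filled memo entries and does not mutate memo.
-- outside the precondition, e.g. on climbStairsDynamic(-1, [0, 3, None]): A returns 3, B returns None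
import Mathlib
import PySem

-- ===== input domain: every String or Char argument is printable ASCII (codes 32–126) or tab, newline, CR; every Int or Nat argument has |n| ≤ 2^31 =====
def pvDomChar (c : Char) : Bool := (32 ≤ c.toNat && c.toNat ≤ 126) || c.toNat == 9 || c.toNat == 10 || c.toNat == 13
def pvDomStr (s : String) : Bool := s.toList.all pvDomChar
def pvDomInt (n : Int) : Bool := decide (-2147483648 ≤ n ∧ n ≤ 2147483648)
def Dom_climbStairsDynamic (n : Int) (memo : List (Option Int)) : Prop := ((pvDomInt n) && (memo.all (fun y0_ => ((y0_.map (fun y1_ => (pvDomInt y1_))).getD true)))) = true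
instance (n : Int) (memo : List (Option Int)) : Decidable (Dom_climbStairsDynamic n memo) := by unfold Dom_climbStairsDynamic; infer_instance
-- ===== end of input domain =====

-- B replaces A's top-down memoized recursion by one bottom-up iterative pass (alternative
-- decomposition); A mutates `memo` in place, B does not — the equivalence proved here is
-- about the RETURN value only.

-- ===== PORT A =====
-- A's recursion, threading the mutated memo list through (return value, memo-after).
def pvGoA (n : Int) (memo : List (Option Int)) : Int × List (Option Int) :=
  match PySem.List.pyGet? memo n with
  | none => (0, memo)                    -- memo[n] raises IndexError; outside Pre_
  | some (some v) => (v, memo)           -- memo[n] is not None: return it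
  | some none =>
    if n = 0 ∨ n = 1 then (1, memo.set n.toNat (some 1))   -- memo[n] = 1; return 1
    else if n < 0 then (0, memo)         -- Python descends below 0 into a raise; outside Pre_
    else
      let r1 := pvGoA (n - 1) memo
      let r2 := pvGoA (n - 2) r1.2
      -- memo[n] = r1 + r2; return memo[n] (the just-stored value)
      (r1.1 + r2.1, r2.2.set n.toNat (some (r1.1 + r2.1)))
termination_by n.toNat
decreasing_by all_goals omega

def climbStairsDynamic (n : Int) (memo : List (Option Int)) : Int := (pvGoA n memo).1

-- ===== PORT B =====
-- B's loop body, named so the invariant below can talk about it.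
def pvStepB (memo : List (Option Int)) (s : Option Int × Option Int) (k : Int) :
    Option Int × Option Int :=
  let cur : Int :=
    match PySem.List.pyGet? memo k with
    | some (some v) => v
    | _ => if k ≤ 1 then 1 else s.2.getD 0 + s.1.getD 0   -- prev1 + prev2
  (s.2, some cur)

def climbStairsDynamic_alt (n : Int) (memo : List (Option Int)) : Int :=
  match PySem.List.pyGet? memo n with
  | some (some v) => v                   -- memo[n] is not None: return it
  | _ =>                                 -- (none case = IndexError in Python; outside Pre_)
    let s := (PySem.List.pyRange 0 (n + 1) 1).foldl (pvStepB memo) (none, none)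
    s.2.getD 0                           -- return prev1 (never the default inside Pre_)

-- ===== PRECONDITION & SPEC =====
-- Pre_ excludes the inputs with an index outside [-len, len) (A raises IndexError) and
-- negative n with wrapped memo[n] = None: there A usually descends into an IndexError,
-- but when deeper wrapped entries are pre-filled it returns a value through Python's
-- negative-index wraparound, a quirk B's nonnegative-stairs loop does not reproduce
-- (B returns None, no int, there).
def Pre_climbStairsDynamic (n : Int) (memo : List (Option Int)) : Prop :=
  (0 ≤ n ∧ n < memo.length) ∨ ((PySem.List.pyGet? memo n).join.isSome = true)
instance (n : Int) (memo : List (Option Int)) : Decidable (Pre_climbStairsDynamic n memo) := by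
  unfold Pre_climbStairsDynamic; infer_instance

def pvWitness_climbStairsDynamic : Int × List (Option Int) := (3, [some 1, none, none, none])

def Spec_climbStairsDynamic (n : Int) (memo : List (Option Int)) (out : Int) : Prop := out = climbStairsDynamic_alt n memo
instance (n : Int) (memo : List (Option Int)) (out : Int) : Decidable (Spec_climbStairsDynamic n memo out) := by unfold Spec_climbStairsDynamic; infer_instance

-- ===== CLAIM (what is proved, stated in full; the proofs are below) =====
def Claim_equal_climbStairsDynamic : Prop := ∀ (n : Int) (memo : List (Option Int)), Dom_climbStairsDynamic n memo → Pre_climbStairsDynamic n memo → Spec_climbStairsDynamic n memo (climbStairsDynamic n memo)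

-- ===== LEMMAS AND PROOFS =====

-- The mathematical value both programs compute: memo entry if pre-filled, else the
-- Fibonacci-style recurrence with base 1 at steps 0 and 1.
def pvF (memo : List (Option Int)) (k : Nat) : Int :=
  match memo.getD k none with
  | some v => v
  | none => if _h : k ≤ 1 then 1 else pvF memo (k - 1) + pvF memo (k - 2)
termination_by k
decreasing_by all_goals omega

-- m is m0 with some originally-None entries filled in with their pvF values.
def pvCons (m m0 : List (Option Int)) : Prop :=
  m.length = m0.length ∧ ∀ j : Nat, j < m0.length →
    m.getD j none = m0.getD j none ∨
    (m0.getD j none = none ∧ m.getD j none = some (pvF m0 j))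

theorem pvCons_refl (m : List (Option Int)) : pvCons m m :=
  ⟨rfl, fun _ _ => Or.inl rfl⟩

-- one-step unfolding of pvF with a plain ite
theorem pvF_eq (memo : List (Option Int)) (k : Nat) :
    pvF memo k = match memo.getD k none with
      | some v => v
      | none => if k ≤ 1 then 1 else pvF memo (k - 1) + pvF memo (k - 2) := by
  rw [pvF]
  cases memo.getD k none <;> simp

theorem pvCons_set (m m0 : List (Option Int)) (k : Nat) (h : pvCons m m0)
    (hk : k < m0.length) (h0 : m0.getD k none = none) :
    pvCons (m.set k (some (pvF m0 k))) m0 := by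
  have hl := h.1
  refine ⟨by simpa using hl, fun j hj => ?_⟩
  by_cases hjk : j = k
  · subst hjk
    right
    refine ⟨h0, ?_⟩
    rw [List.getD_eq_getElem?_getD, List.getElem?_set_self (by omega)]
    simp
  · have : (m.set k (some (pvF m0 k))).getD j none = m.getD j none := by
      rw [List.getD_eq_getElem?_getD, List.getD_eq_getElem?_getD,
        List.getElem?_set_ne (by omega)]
    rw [this]
    exact h.2 j hj

theorem pvGoA_main : ∀ (k : Nat) (m m0 : List (Option Int)), pvCons m m0 → k < m0.length →
    (pvGoA (k : Int) m).1 = pvF m0 k ∧ pvCons (pvGoA (k : Int) m).2 m0 := by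
  intro k
  induction k using Nat.strong_induction_on with
  | _ k ih =>
    intro m m0 hc hk
    have hlenEq := hc.1
    have hlen : k < m.length := by omega
    have hget : PySem.List.pyGet? m (k : Int) = some (m.getD k none) := by
      rw [PySem.List.pyGet?_natCast]
      rw [List.getElem?_eq_getElem hlen, List.getD_eq_getElem?_getD,
        List.getElem?_eq_getElem hlen]
      rfl
    cases hv : m.getD k none with
    | some v =>
      constructor
      · rw [pvGoA, hget, hv]
        rcases hc.2 k hk with heq | ⟨h0, hm⟩
        · rw [pvF_eq m0 k, ← heq, hv]
        · rw [hv] at hm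
          exact (Option.some.injEq _ _).mp hm
      · rw [pvGoA, hget, hv]; exact hc
    | none =>
      have h0 : m0.getD k none = none := by
        rcases hc.2 k hk with heq | ⟨h0, _⟩
        · rw [← heq, hv]
        · exact h0
      by_cases hb : (k : Int) = 0 ∨ (k : Int) = 1
      · have hk1 : k ≤ 1 := by omega
        have hF : pvF m0 k = 1 := by rw [pvF_eq m0 k, h0]; simp [hk1]
        have hset := pvCons_set m m0 k hc hk h0
        rw [hF] at hset
        rw [pvGoA, hget, hv]
        simp only [hb, if_true]
        constructor
        · simp [hF]
        · simpa using hset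
      · have hk2 : 2 ≤ k := by omega
        have hneg : ¬ ((k : Int) < 0) := by omega
        have e1 : (k : Int) - 1 = ((k - 1 : Nat) : Int) := by omega
        have e2 : (k : Int) - 2 = ((k - 2 : Nat) : Int) := by omega
        rw [pvGoA, hget, hv]
        simp only [hb, if_false, hneg]
        rw [e1, e2]
        obtain ⟨ha1, ha2⟩ := ih (k - 1) (by omega) m m0 hc (by omega)
        obtain ⟨hb1, hb2⟩ := ih (k - 2) (by omega) _ m0 ha2 (by omega)
        have hF : pvF m0 k = pvF m0 (k - 1) + pvF m0 (k - 2) := by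
          rw [pvF_eq m0 k, h0]; simp [show ¬ k ≤ 1 by omega]
        constructor
        · simp only [ha1, hb1, hF]
        · have := pvCons_set _ m0 k hb2 hk h0
          rw [hF] at this
          simpa [ha1, hb1] using this

theorem pvB_main (memo : List (Option Int)) :
    ∀ i : Nat, i < memo.length →
    (PySem.List.pyRange 0 ((i : Int) + 1) 1).foldl (pvStepB memo) (none, none) =
      ((if i = 0 then none else some (pvF memo (i - 1))), some (pvF memo i)) := by
  intro i
  induction i with
  | zero =>
    intro _
    rw [show ((0 : Nat) : Int) + 1 = 0 + 1 by ring, PySem.List.pyRange_one_singleton]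
    have hget : PySem.List.pyGet? memo (0 : Int) = some (memo.getD 0 none) := by
      rw [show (0 : Int) = ((0 : Nat) : Int) by rfl, PySem.List.pyGet?_natCast]
      rw [List.getElem?_eq_getElem (by omega), List.getD_eq_getElem?_getD,
        List.getElem?_eq_getElem (by omega)]
      rfl
    simp only [List.foldl, pvStepB, hget]
    cases hv : memo.getD 0 none with
    | some v =>
      have hF : pvF memo 0 = v := by rw [pvF_eq memo 0, hv]
      simp [hF]
    | none =>
      have hF : pvF memo 0 = 1 := by rw [pvF_eq memo 0, hv]; simp
      simp [hF]
  | succ i ihi =>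
    intro hlen
    have hget : PySem.List.pyGet? memo ((i + 1 : Nat) : Int) = some (memo.getD (i + 1) none) := by
      rw [PySem.List.pyGet?_natCast]
      rw [List.getElem?_eq_getElem hlen, List.getD_eq_getElem?_getD,
        List.getElem?_eq_getElem hlen]
      rfl
    have hsplit : PySem.List.pyRange 0 (((i + 1 : Nat) : Int) + 1) 1 =
        PySem.List.pyRange 0 ((i : Int) + 1) 1 ++ [((i + 1 : Nat) : Int)] := by
      rw [show (((i + 1 : Nat) : Int) + 1) = ((i : Int) + 1) + 1 by push_cast; ring]
      rw [PySem.List.pyRange_one_succ_right (by omega)]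
      norm_num
    rw [hsplit, List.foldl_append, ihi (by omega)]
    simp only [List.foldl, pvStepB, hget]
    cases hv : memo.getD (i + 1) none with
    | some v =>
      have : pvF memo (i + 1) = v := by rw [pvF_eq memo (i + 1), hv]
      simp [this]
    | none =>
      by_cases hi : i = 0
      · subst hi
        have : pvF memo 1 = 1 := by rw [pvF_eq memo 1, hv]; simp
        simp [this]
      · have hle : ¬ ((i + 1 : Nat) : Int) ≤ 1 := by omega
        have hF : pvF memo (i + 1) = pvF memo i + pvF memo (i - 1) := by
          rw [pvF_eq memo (i + 1), hv]; simp [show ¬ i + 1 ≤ 1 by omega]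
        simp [hi, hF]

-- ===== VERDICT (by name: the statement is the Claim_ definition above) =====
theorem climbStairsDynamic_spec : Claim_equal_climbStairsDynamic := by
  intro n memo _hdom hpre
  unfold Spec_climbStairsDynamic climbStairsDynamic climbStairsDynamic_alt
  cases hget : PySem.List.pyGet? memo n with
  | none =>
    exfalso
    rcases hpre with ⟨h0, hl⟩ | hj
    · rw [PySem.List.pyGet?_eq_none_iff] at hget
      exact hget (by unfold PySem.Raise.InRange; omega)
    · rw [hget] at hj
      simp at hj
  | some o =>
    cases o with
    | some v => rw [pvGoA, hget]
    | none =>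
      have hn : 0 ≤ n ∧ n < memo.length := by
        rcases hpre with h | hj
        · exact h
        · rw [hget] at hj; simp at hj
      obtain ⟨h0, hl⟩ := hn
      have hcast : n = ((n.toNat : Nat) : Int) := by omega
      have hlt : n.toNat < memo.length := by omega
      have hA := (pvGoA_main n.toNat memo memo (pvCons_refl memo) hlt).1
      have hLA : (pvGoA n memo).1 = pvF memo n.toNat := by
        rw [hcast]; simp only [Int.toNat_natCast]; exact hA
      rw [hLA]
      show pvF memo n.toNat =
        ((PySem.List.pyRange 0 (n + 1) 1).foldl (pvStepB memo) (none, none)).2.getD 0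
      rw [hcast, pvB_main memo n.toNat hlt]
      simp
      have h1 : (max n 0).toNat = n.toNat := by omega
      rw [h1]
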